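-- pv_equiv track=rewrite | github.com/Mamatu/vatf | utils/libaudiocompare.py | _get_pathes_tuples
-- ===== SOURCE A (Python) =====
-- def _get_pathes_tuples(audio_data):
--     keys = [(x,y) for x in audio_data.keys() for y in audio_data.keys() if x != y]
--     output = []
--     existed = []
--     for k in keys:
--         if k not in existed:
--             existed.append(k)
--             existed.append((k[1], k[0]))
--             output.append(k)
--     return output
-- ===== SOURCE B (Python) =====
-- def _get_pathes_tuples(audio_data):
--     ks = list(audio_data.keys())
--     output = []
--     while ks:
--         x = ks.pop(0)
--         for y in ks:
--             output.append((x, y))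
--     return output
-- ===== Notes on version B (the rewrite author's own statement) =====
-- stated objective: faster
-- what changed: B consumes the key list front-to-back, pairing each head with the remaining keys directly, instead of generating all n(n-1) ordered pairs and filtering them through a linearly-scanned 'existed' seen-list.
import Mathlib
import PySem

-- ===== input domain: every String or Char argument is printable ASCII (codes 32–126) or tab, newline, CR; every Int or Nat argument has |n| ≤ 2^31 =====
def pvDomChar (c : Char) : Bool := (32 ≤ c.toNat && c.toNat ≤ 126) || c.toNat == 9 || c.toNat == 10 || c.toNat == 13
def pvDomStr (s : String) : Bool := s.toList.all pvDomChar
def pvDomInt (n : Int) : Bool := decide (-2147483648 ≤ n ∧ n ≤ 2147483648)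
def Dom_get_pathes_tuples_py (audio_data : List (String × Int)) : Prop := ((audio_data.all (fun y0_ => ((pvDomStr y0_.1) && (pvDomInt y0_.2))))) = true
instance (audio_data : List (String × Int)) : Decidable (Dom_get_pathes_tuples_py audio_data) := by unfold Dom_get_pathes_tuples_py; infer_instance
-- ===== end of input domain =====

-- B replaces A's all-ordered-pairs generation + 'existed' seen-list filter by one
-- front-to-back pass pairing each key with the keys after it (objective: faster).

-- ===== PORT A =====
-- the dict's keys: distinct first components in insertion order
def pvKeysOf (audio_data : List (String × Int)) : List String :=
  PySem.Set.ofList (audio_data.map (·.1))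

-- one step of A's 'for k in keys' loop: state = (output, existed)
def pvStepA (st : List (String × String) × List (String × String)) (k : String × String) :
    List (String × String) × List (String × String) :=
  if k ∈ st.2 then st else (st.1 ++ [k], st.2 ++ [k, (k.2, k.1)])

def get_pathes_tuples_py (audio_data : List (String × Int)) : List (String × String) :=
  let ks := pvKeysOf audio_data
  let keys := ks.flatMap (fun x => (ks.filter (fun y => x != y)).map (fun y => (x, y)))
  (keys.foldl pvStepA ([], [])).1

-- ===== PORT B =====
-- Source B's while-loop: pop the head, pair it with the remaining keys, repeat
def pvAltLoop : List String → List (String × String) → List (String × String)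
  | [], out => out
  | x :: ks, out => pvAltLoop ks (out ++ ks.map (fun y => (x, y)))

def get_pathes_tuples_py_alt (audio_data : List (String × Int)) : List (String × String) :=
  pvAltLoop (pvKeysOf audio_data) []

-- ===== PRECONDITION & SPEC =====
def Spec_get_pathes_tuples_py (audio_data : List (String × Int)) (out : List (String × String)) : Prop := out = get_pathes_tuples_py_alt audio_data
instance (audio_data : List (String × Int)) (out : List (String × String)) : Decidable (Spec_get_pathes_tuples_py audio_data out) := by unfold Spec_get_pathes_tuples_py; infer_instance

-- ===== CLAIM (what is proved, stated in full; the proofs are below) =====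
def Claim_equal_get_pathes_tuples_py : Prop := ∀ (audio_data : List (String × Int)), Dom_get_pathes_tuples_py audio_data → Spec_get_pathes_tuples_py audio_data (get_pathes_tuples_py audio_data)

-- ===== LEMMAS AND PROOFS =====

-- the intended result on a key list: each key paired with all later keys
def pvComb : List String → List (String × String)
  | [] => []
  | x :: r => r.map (fun y => (x, y)) ++ pvComb r

theorem pvAltLoop_eq (ks : List String) : ∀ out, pvAltLoop ks out = out ++ pvComb ks := by
  induction ks with
  | nil => intro out; simp [pvAltLoop, pvComb]
  | cons x r ih => intro out; simp [pvAltLoop, pvComb, ih, List.append_assoc]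

-- A's loop skips every pair already in 'existed'
theorem pvFoldA_skip (ps : List (String × String)) :
    ∀ O E, (∀ p ∈ ps, p ∈ E) → List.foldl pvStepA (O, E) ps = (O, E) := by
  induction ps with
  | nil => intro O E _; rfl
  | cons p ps ih =>
      intro O E h
      have hp : p ∈ E := h p (by simp)
      simp only [List.foldl_cons, pvStepA, if_pos hp]
      exact ih O E (fun q hq => h q (by simp [hq]))

-- A's loop on a fresh row (x, y) for y ∈ ys: everything is emitted, and
-- 'existed' gains both orientations of each emitted pair
theorem pvFoldA_row (x : String) (ys : List String) :
    ∀ O E, ys.Nodup → x ∉ ys → (∀ y ∈ ys, (x, y) ∉ E) →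
    List.foldl pvStepA (O, E) (ys.map (fun y => (x, y))) =
      (O ++ ys.map (fun y => (x, y)), E ++ ys.flatMap (fun y => [(x, y), (y, x)])) := by
  induction ys with
  | nil => intro O E _ _ _; simp
  | cons y ys ih =>
      intro O E hnd hx hE
      have hxy : x ≠ y := fun h => hx (h ▸ by simp)
      have hnotin : (x, y) ∉ E := hE y (by simp)
      simp only [List.map_cons, List.foldl_cons, pvStepA, if_neg hnotin]
      rw [ih (O ++ [(x, y)]) (E ++ [(x, y), (y, x)])
            (List.nodup_cons.mp hnd).2 (fun h => hx (by simp [h])) ?_]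
      · simp [List.append_assoc]
      · intro z hz hmem
        rcases List.mem_append.mp hmem with h | h
        · exact hE z (List.mem_cons_of_mem _ hz) h
        · rcases List.mem_cons.mp h with h | h
          · have hzy : z = y := congrArg Prod.snd h
            exact (List.nodup_cons.mp hnd).1 (hzy ▸ hz)
          · have hxy' : x = y := congrArg Prod.fst (List.mem_singleton.mp h)
            exact hxy hxy'

-- main invariant: processing the rows of the unprocessed suffix, with 'existed'
-- containing exactly the pairs touching an already-processed key, emits pvComb suf
theorem pvFoldA_main (suf : List String) :
    ∀ (pre : List String) (O E : List (String × String)),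
    (pre ++ suf).Nodup →
    (∀ a ∈ pre ++ suf, ∀ b ∈ pre ++ suf, a ≠ b → ((a, b) ∈ E ↔ (a ∈ pre ∨ b ∈ pre))) →
    (List.foldl pvStepA (O, E)
        (suf.flatMap (fun x => ((pre ++ suf).filter (fun y => x != y)).map (fun y => (x, y))))).1
      = O ++ pvComb suf := by
  induction suf with
  | nil => intro pre O E _ _; simp [pvComb]
  | cons x r ih =>
      intro pre O E hnd hinv
      have hdisj := List.disjoint_of_nodup_append hnd
      have hxpre : x ∉ pre := fun h => hdisj h (by simp)
      have hndsuf := (List.nodup_append.mp hnd).2.1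
      have hxr : x ∉ r := (List.nodup_cons.mp hndsuf).1
      have hndr : r.Nodup := (List.nodup_cons.mp hndsuf).2
      have hrow : (pre ++ x :: r).filter (fun y => x != y) = pre ++ r := by
        rw [List.filter_append, List.filter_cons]
        have h1 : pre.filter (fun y => x != y) = pre :=
          List.filter_eq_self.mpr (fun y hy => by
            simp only [bne_iff_ne, ne_eq]
            exact fun h => hxpre (h ▸ hy))
        have h2 : r.filter (fun y => x != y) = r :=
          List.filter_eq_self.mpr (fun y hy => by
            simp only [bne_iff_ne, ne_eq]
            exact fun h => hxr (h ▸ hy))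
        simp [h1, h2]
      simp only [List.flatMap_cons, hrow, List.map_append, List.foldl_append]
      -- skip the (x, p) pairs with p ∈ pre
      rw [pvFoldA_skip (pre.map (fun y => (x, y))) O E ?_]
      · -- emit the (x, y) pairs with y ∈ r
        rw [pvFoldA_row x r O E hndr hxr ?_]
        · -- recurse with pre' = pre ++ [x]
          have hre : pre ++ x :: r = (pre ++ [x]) ++ r := by simp
          have hmain := ih (pre ++ [x]) (O ++ r.map (fun y => (x, y)))
            (E ++ r.flatMap (fun y => [(x, y), (y, x)]))
            (by rw [← hre]; exact hnd) ?_
          · rw [hre]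
            rw [hmain]
            simp [pvComb, List.append_assoc]
          · -- the updated invariant
            intro a ha b hb hab
            rw [← hre] at ha hb
            have hinv' := hinv a ha b hb hab
            constructor
            · intro hmem
              rcases List.mem_append.mp hmem with h | h
              · rcases hinv'.mp h with h' | h' <;> simp [h']
              · rcases List.mem_flatMap.mp h with ⟨y, hy, hmem'⟩
                rcases List.mem_cons.mp hmem' with h1 | h1
                · have : a = x := congrArg Prod.fst h1
                  left; simp [this]
                · have : b = x := congrArg Prod.snd (List.mem_singleton.mp h1)
                  right; simp [this]
            · intro hmem
              have hgoal : (a ∈ pre ∨ b ∈ pre) →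
                  (a, b) ∈ E ++ r.flatMap (fun y => [(x, y), (y, x)]) :=
                fun h => List.mem_append.mpr (Or.inl (hinv'.mpr h))
              rcases hmem with h | h
              · rcases List.mem_append.mp h with h' | h'
                · exact hgoal (Or.inl h')
                · -- a = x
                  have hax : a = x := List.mem_singleton.mp h'
                  rcases List.mem_append.mp hb with h'' | h''
                  · exact hgoal (Or.inr h'')
                  · rcases List.mem_cons.mp h'' with h3 | h3
                    · exact absurd (hax.trans h3.symm) hab
                    · exact List.mem_append.mpr (Or.inr
                        (List.mem_flatMap.mpr ⟨b, h3, by simp [hax]⟩))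
              · rcases List.mem_append.mp h with h' | h'
                · exact hgoal (Or.inr h')
                · -- b = x
                  have hbx : b = x := List.mem_singleton.mp h'
                  rcases List.mem_append.mp ha with h'' | h''
                  · exact hgoal (Or.inl h'')
                  · rcases List.mem_cons.mp h'' with h3 | h3
                    · exact absurd (h3.trans hbx.symm) hab
                    · exact List.mem_append.mpr (Or.inr
                        (List.mem_flatMap.mpr ⟨a, h3, by simp [hbx]⟩))
        · -- fresh pairs: (x, y), y ∈ r, not yet in existed
          intro y hy
          have hxy : x ≠ y := fun h => hxr (h ▸ hy)
          rw [hinv x (by simp) y (by simp [hy]) hxy]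
          push Not
          exact ⟨hxpre, fun h => hdisj h (by simp [hy])⟩
      · -- seen pairs: (x, p) with p ∈ pre are in existed
        intro q hq
        rcases List.mem_map.mp hq with ⟨p, hp, rfl⟩
        have hxp : x ≠ p := fun h => hxpre (h ▸ hp)
        exact (hinv x (by simp) p (by simp [hp]) hxp).mpr (Or.inr hp)

-- ===== VERDICT (by name: the statement is the Claim_ definition above) =====
theorem get_pathes_tuples_py_spec : Claim_equal_get_pathes_tuples_py := by
  intro audio_data _
  unfold Spec_get_pathes_tuples_py get_pathes_tuples_py get_pathes_tuples_py_alt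
  rw [pvAltLoop_eq]
  have hnd : (pvKeysOf audio_data).Nodup := PySem.Set.nodup_ofList _
  have := pvFoldA_main (pvKeysOf audio_data) [] [] []
    (by simpa using hnd) (by simp)
  simpa using this
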